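-- pv_equiv track=rewrite | github.com/ZhangChengX/PDFBoT | extractTextFromHTML.py | getSecondMostX
-- ===== SOURCE A (Python) =====
-- def getSecondMostX(page):
--     countX = {}
--     for divDict in page:
--         fs = getClassName(divDict['class'], 'x')
--         if fs not in countX:
--             countX[fs] = 1
--         else:
--             countX[fs] = countX[fs]+1
--     maxX= max(countX, key=countX.get)
--     del countX[maxX]
--     return max(countX, key=countX.get)
--
-- def getClassName(listOfClass, symbol):
--     for item in listOfClass:
--         if item.startswith(symbol):
--             return item
--     return None
-- ===== SOURCE B (Python) =====
-- def getSecondMostX(page):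
--     counts = {}
--     for divDict in page:
--         name = next((c for c in divDict['class'] if c.startswith('x')), None)
--         counts[name] = counts.get(name, 0) + 1
--     top = second = None
--     topCount = secondCount = 0
--     for name, count in counts.items():
--         if count > topCount:
--             second, secondCount = top, topCount
--             top, topCount = name, count
--         elif count > secondCount:
--             second, secondCount = name, count
--     return second
-- ===== Notes on version B (the rewrite author's own statement) =====
-- stated objective: alternative
-- what changed: B replaces A's max/del/max triple scan of the frequency dict by a single pass that tracks the top two (name,count) pairs, and replaces the helper loop getClassName by a generator-expression next(); the counting loop uses dict.get instead of a membership test.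
-- outside the precondition, e.g. on getSecondMostX([{'class': ['xa']}, {'class': ['xa']}, {'class': []}]): A returns None, B returns None
import Mathlib
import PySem

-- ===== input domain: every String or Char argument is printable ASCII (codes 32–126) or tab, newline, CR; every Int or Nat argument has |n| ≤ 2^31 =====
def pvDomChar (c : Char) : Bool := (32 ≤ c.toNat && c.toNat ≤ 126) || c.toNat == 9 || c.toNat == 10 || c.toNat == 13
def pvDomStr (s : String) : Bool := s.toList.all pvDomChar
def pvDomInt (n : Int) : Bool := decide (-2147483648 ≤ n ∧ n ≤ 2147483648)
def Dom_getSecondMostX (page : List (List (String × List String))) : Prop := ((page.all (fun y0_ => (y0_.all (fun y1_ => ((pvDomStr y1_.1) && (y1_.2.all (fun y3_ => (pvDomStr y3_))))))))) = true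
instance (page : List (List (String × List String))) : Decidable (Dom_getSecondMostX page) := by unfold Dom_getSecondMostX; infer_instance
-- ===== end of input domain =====

-- B replaces A's max/del/max triple scan of the frequency dict by a single pass tracking the
-- top-two (name, count) pairs; same cost class, different selection algorithm (objective: alternative).

-- ===== PORT A =====
def getClassName (listOfClass : List String) (symbol : String) : Option String :=
  match listOfClass with
  | [] => none
  | item :: rest =>
      if PySem.Str.startswith item symbol then some item else getClassName rest symbol

def getSecondMostX (page : List (List (String × List String))) : String :=
  let countX : PySem.Dict (Option String) Int :=
    page.foldl (fun d divDict =>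
      -- divDict['class'] raises KeyError when absent (excluded by Pre_); getD is exact when present
      let fs := getClassName ((PySem.Dict.mk divDict).getD "class" []) "x"
      if (PySem.Dict.contains d fs) = false then d.insert fs 1
      else d.insert fs (d.getD fs 0 + 1))                -- countX[fs] = countX[fs]+1 (key present in this branch)
      PySem.Dict.empty
  -- max(countX, key=countX.get): first key of maximal count; countX.get is exact as getD 0 on present keys
  match PySem.List.max? countX.keys (fun k => countX.getD k 0) with
  | none => ""                                           -- Python: ValueError (empty dict), excluded by Pre_
  | some maxX =>
      let c2 := countX.erase maxX                        -- del countX[maxX]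
      match PySem.List.max? c2.keys (fun k => c2.getD k 0) with
      | none => ""                                       -- Python: ValueError, excluded by Pre_
      | some (some s) => s
      | some none => ""                                  -- Python returns None (not a str), excluded by Pre_

-- ===== PORT B =====
def firstXName (classes : List String) : Option String :=
  classes.find? (fun c => PySem.Str.startswith c "x")    -- next((c for c in … if c.startswith('x')), None)

-- state (top, topCount, second, secondCount)
def topTwoStep (st : Option (Option String) × Int × Option (Option String) × Int)
    (kv : Option String × Int) : Option (Option String) × Int × Option (Option String) × Int :=
  if st.2.1 < kv.2 then (some kv.1, kv.2, st.1, st.2.1)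
  else if st.2.2.2 < kv.2 then (st.1, st.2.1, some kv.1, kv.2)
  else st

def getSecondMostX_alt (page : List (List (String × List String))) : String :=
  let counts : PySem.Dict (Option String) Int :=
    page.foldl (fun d divDict =>
      let name := firstXName ((PySem.Dict.mk divDict).getD "class" [])
      d.insert name (d.getD name 0 + 1)) PySem.Dict.empty
  let st := (PySem.Dict.items counts).foldl topTwoStep (none, 0, none, 0)
  match st.2.2.1 with
  | some (some s) => s
  | _ => ""                                              -- Python B returns None here, excluded by Pre_

-- ===== PRECONDITION & SPEC =====
-- helper definitions for Pre_ only: the x-class name of each div, and the first-most / second-most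
-- frequent name characterized declaratively by counts (first key of maximal count in first-occurrence order)
def pvNames (page : List (List (String × List String))) : List (Option String) :=
  page.map (fun d => ((PySem.Dict.mk d).getD "class" []).find? (fun c => PySem.Str.startswith c "x"))

def pvTop (ns : List (Option String)) : Option (Option String) :=
  (PySem.List.dedup ns).find? (fun k => (PySem.List.dedup ns).all (fun j => ns.count j ≤ ns.count k))

def pvSecond (ns : List (Option String)) : Option (Option String) :=
  match pvTop ns with
  | none => none
  | some t =>
      ((PySem.List.dedup ns).filter (fun k => k ≠ t)).find?
        (fun k => ((PySem.List.dedup ns).filter (fun j => j ≠ t)).all (fun j => ns.count j ≤ ns.count k))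

-- Pre_ excludes pages where some div lacks a 'class' entry (A raises KeyError), where fewer than two
-- distinct x-class names occur (A raises ValueError), and where the second-most-frequent group is the
-- divs with no x-class name (A returns None, which is not a str).
def Pre_getSecondMostX (page : List (List (String × List String))) : Prop :=
  (∀ d ∈ page, (PySem.Dict.contains (PySem.Dict.mk d) "class") = true) ∧
  2 ≤ (PySem.List.dedup (pvNames page)).length ∧
  ((pvSecond (pvNames page)).getD none).isSome = true

instance (page : List (List (String × List String))) : Decidable (Pre_getSecondMostX page) := by
  unfold Pre_getSecondMostX; infer_instance

def pvWitness_getSecondMostX : (List (List (String × List String))) :=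
  [[("class", ["xa"])], [("class", ["xb"])]]

def Spec_getSecondMostX (page : List (List (String × List String))) (out : String) : Prop := out = getSecondMostX_alt page
instance (page : List (List (String × List String))) (out : String) : Decidable (Spec_getSecondMostX page out) := by unfold Spec_getSecondMostX; infer_instance

-- ===== CLAIM (what is proved, stated in full; the proofs are below) =====
def Claim_equal_getSecondMostX : Prop := ∀ (page : List (List (String × List String))), Dom_getSecondMostX page → Pre_getSecondMostX page → Spec_getSecondMostX page (getSecondMostX page)

-- ===== LEMMAS AND PROOFS =====

lemma max?_append_singleton {α κ : Type} [LT κ] [DecidableLT κ] (l : List α) (x : α) (key : α → κ) :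
    PySem.List.max? (l ++ [x]) key =
      match PySem.List.max? l key with
      | none => some x
      | some m => if key m < key x then some x else some m := by
  simp only [PySem.List.max?, List.foldl_append, List.foldl_cons, List.foldl_nil]
  rfl

lemma foldlMax_map {α β κ : Type} [LT κ] [DecidableLT κ] (g : α → β) (f : β → κ) :
    ∀ (l : List α) (acc : Option α),
      List.foldl (fun acc x => match acc with
        | none => some x
        | some m => if f m < f x then some x else some m) (acc.map g) (l.map g)
      = (List.foldl (fun acc x => match acc with
          | none => some x
          | some m => if f (g m) < f (g x) then some x else some m) acc l).map g := by
  intro l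
  induction l with
  | nil => intro acc; rfl
  | cons a t ih =>
      intro acc
      cases acc with
      | none => simpa using ih (some a)
      | some m =>
          simp only [List.map_cons, List.foldl_cons, Option.map_some]
          by_cases h : f (g m) < f (g a)
          · simp only [h, if_pos]
            simpa using ih (some a)
          · simp only [h, if_neg, not_false_iff]
            simpa using ih (some m)

lemma max?_map {α β κ : Type} [LT κ] [DecidableLT κ] (g : α → β) (f : β → κ) (l : List α) :
    PySem.List.max? (l.map g) f = (PySem.List.max? l (fun a => f (g a))).map g := by
  simpa [PySem.List.max?] using foldlMax_map g f l none

lemma max?_congr_mem {α κ : Type} [LT κ] [DecidableLT κ] (f f' : α → κ) :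
    ∀ (l : List α) (acc : Option α), (∀ a ∈ l, f a = f' a) → (∀ m, acc = some m → f m = f' m) →
      List.foldl (fun acc x => match acc with
        | none => some x
        | some m => if f m < f x then some x else some m) acc l
      = List.foldl (fun acc x => match acc with
        | none => some x
        | some m => if f' m < f' x then some x else some m) acc l := by
  intro l
  induction l with
  | nil => intro acc _ _; rfl
  | cons a t ih =>
      intro acc hl hacc
      have ha : f a = f' a := hl a (by simp)
      cases acc with
      | none =>
          simp only [List.foldl_cons]
          exact ih (some a) (fun b hb => hl b (by simp [hb])) (by intro m hm; cases hm; exact ha)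
      | some m =>
          have hm : f m = f' m := hacc m rfl
          simp only [List.foldl_cons, hm, ha]
          by_cases h : f' m < f' a
          · simp only [h, if_pos]
            exact ih (some a) (fun b hb => hl b (by simp [hb])) (by intro m hm; cases hm; exact ha)
          · simp only [h, if_neg, not_false_iff]
            exact ih (some m) (fun b hb => hl b (by simp [hb])) (by intro n h; cases h; exact hm)

lemma max?_congr {α κ : Type} [LT κ] [DecidableLT κ] (f f' : α → κ) (l : List α)
    (h : ∀ a ∈ l, f a = f' a) :
    PySem.List.max? l f = PySem.List.max? l f' := by
  simpa [PySem.List.max?] using max?_congr_mem f f' l none h (by simp)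

lemma max?_keys_getD (d : PySem.Dict (Option String) Int) (h : d.keys.Nodup) :
    PySem.List.max? d.keys (fun k => d.getD k 0) =
      (PySem.List.max? d.items Prod.snd).map Prod.fst := by
  have hkeys : d.keys = d.items.map Prod.fst := rfl
  rw [hkeys, max?_map]
  refine congrArg (Option.map Prod.fst) (max?_congr _ _ _ ?_)
  intro kv hkv
  have hmem : (kv.1, kv.2) ∈ d.items := by simpa using hkv
  exact PySem.Dict.getD_of_mem_items _ hmem h 0

-- the value of the one-pass "second" slot, stated through A's max?-of-the-filtered-list
def secSpec (l : List (Option String × Int)) : Option (Option String × Int) :=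
  match PySem.List.max? l Prod.snd with
  | none => none
  | some b => PySem.List.max? (l.filter (fun p => !(p.1 == b.1))) Prod.snd

def vOf (o : Option (Option String × Int)) : Int := o.elim 0 Prod.snd

lemma bfold_spec : ∀ (l : List (Option String × Int)),
    (l.map Prod.fst).Nodup → (∀ kv ∈ l, 1 ≤ kv.2) →
    l.foldl topTwoStep (none, 0, none, 0) =
      ((PySem.List.max? l Prod.snd).map Prod.fst, vOf (PySem.List.max? l Prod.snd),
       (secSpec l).map Prod.fst, vOf (secSpec l)) := by
  intro l
  induction l using List.reverseRecOn with
  | nil => intro _ _; rfl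
  | append_singleton l x ih =>
      intro hnd hpos
      have hndl : (l.map Prod.fst).Nodup := by
        simp only [List.map_append, List.nodup_append] at hnd
        exact hnd.1
      have hx1 : x.1 ∉ l.map Prod.fst := by
        simp only [List.map_append, List.nodup_append] at hnd
        intro hmem
        exact hnd.2.2 x.1 hmem x.1 (by simp) rfl
      have hxpos : (1 : Int) ≤ x.2 := hpos x (by simp)
      have hposl : ∀ kv ∈ l, (1 : Int) ≤ kv.2 := fun kv hkv => hpos kv (by simp [hkv])
      rw [List.foldl_append, ih hndl hposl]
      cases hm : PySem.List.max? l Prod.snd with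
      | none =>
          have hl : l = [] := (PySem.List.max?_eq_none_iff l Prod.snd).mp hm
          subst hl
          have hx0 : (0:Int) < x.2 := by omega
          simp [topTwoStep, secSpec, PySem.List.max?, vOf, hx0]
      | some b =>
          have hbmem : b ∈ l := PySem.List.max?_mem hm
          have hbx : b.1 ≠ x.1 := by
            intro h
            exact hx1 (h ▸ List.mem_map_of_mem hbmem)
          have hfilter_x : l.filter (fun p => !(p.1 == x.1)) = l := by
            refine List.filter_eq_self.mpr ?_
            intro p hp
            simp only [Bool.not_eq_eq_eq_not, Bool.not_true, beq_eq_false_iff_ne, ne_eq]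
            intro h
            exact hx1 (h ▸ List.mem_map_of_mem hp)
          have hmax_app := max?_append_singleton l x Prod.snd
          rw [hm] at hmax_app
          by_cases htop : b.2 < x.2
          · -- new element becomes the top
            have hmax : PySem.List.max? (l ++ [x]) Prod.snd = some x := by
              rw [hmax_app]; simp [htop]
            have hsec : secSpec (l ++ [x]) = some b := by
              unfold secSpec
              rw [hmax]
              show PySem.List.max? ((l ++ [x]).filter (fun p => !(p.1 == x.1))) Prod.snd = some b
              rw [List.filter_append, hfilter_x]
              simpa using hm
            rw [hmax, hsec]
            simp [topTwoStep, vOf, htop]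
          · -- top unchanged
            have hmax : PySem.List.max? (l ++ [x]) Prod.snd = some b := by
              rw [hmax_app]; simp [htop]
            have hfilter_b : (l ++ [x]).filter (fun p => !(p.1 == b.1)) =
                l.filter (fun p => !(p.1 == b.1)) ++ [x] := by
              rw [List.filter_append]
              simp [Ne.symm hbx]
            have hsec_l : secSpec l = PySem.List.max? (l.filter (fun p => !(p.1 == b.1))) Prod.snd := by
              unfold secSpec
              rw [hm]
            have hsec_app : secSpec (l ++ [x]) =
                match PySem.List.max? (l.filter (fun p => !(p.1 == b.1))) Prod.snd with
                | none => some x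
                | some s => if s.2 < x.2 then some x else some s := by
              unfold secSpec
              rw [hmax]
              show PySem.List.max? ((l ++ [x]).filter (fun p => !(p.1 == b.1))) Prod.snd = _
              rw [hfilter_b, max?_append_singleton]
              cases PySem.List.max? (List.filter (fun p => !p.1 == b.1) l) Prod.snd <;> rfl
            rw [← hsec_l] at hsec_app
            cases hs : secSpec l with
            | none =>
                have hsx : secSpec (l ++ [x]) = some x := by rw [hsec_app, hs]
                rw [hmax, hsx]
                have hx0 : (0:Int) < x.2 := by omega
                simp [topTwoStep, vOf, htop, hx0]
            | some s =>
                by_cases hsc : s.2 < x.2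
                · have hsx : secSpec (l ++ [x]) = some x := by
                    rw [hsec_app, hs]; simp [hsc]
                  rw [hmax, hsx]
                  simp [topTwoStep, vOf, htop, hsc]
                · have hsx : secSpec (l ++ [x]) = some s := by
                    rw [hsec_app, hs]; simp [hsc]
                  rw [hmax, hsx]
                  simp [topTwoStep, vOf, htop, hsc]

lemma getClassName_eq_find? (listOfClass : List String) (symbol : String) :
    getClassName listOfClass symbol =
      listOfClass.find? (fun c => PySem.Str.startswith c symbol) := by
  induction listOfClass with
  | nil => rfl
  | cons a t ih =>
      cases h : PySem.Chars.startswith a.toList symbol.toList with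
      | true => simp [getClassName, List.find?, PySem.Str.startswith, h]
      | false => simp [getClassName, List.find?, PySem.Str.startswith, h, ih]

-- the common counting step both ports reduce to
def bStep (d : PySem.Dict (Option String) Int) (divDict : List (String × List String)) :
    PySem.Dict (Option String) Int :=
  let name := ((PySem.Dict.mk divDict).getD "class" []).find? (fun c => PySem.Str.startswith c "x")
  d.insert name (d.getD name 0 + 1)

lemma counts_pos (page : List (List (String × List String))) :
    ∀ (d : PySem.Dict (Option String) Int), (∀ kv ∈ d.items, (1:Int) ≤ kv.2) →
      ∀ kv ∈ (page.foldl bStep d).items, (1:Int) ≤ kv.2 := by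
  induction page with
  | nil => intro d hd; simpa using hd
  | cons a t ih =>
      intro d hd
      refine ih _ ?_
      intro kv hkv
      rcases (PySem.Dict.mem_items_insert _ _ _ _).mp hkv with h | h
      · have hge : (0:Int) ≤ d.getD (((PySem.Dict.mk a).getD "class" []).find?
            (fun c => PySem.Str.startswith c "x")) 0 := by
          cases hg : d.get? (((PySem.Dict.mk a).getD "class" []).find?
              (fun c => PySem.Str.startswith c "x")) with
          | none => rw [PySem.Dict.getD_of_get?_eq_none d 0 hg]
          | some v =>
              have hv := hd _ (PySem.Dict.mem_items_of_get?_eq_some d hg)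
              rw [PySem.Dict.getD_of_get?_eq_some d 0 hg]
              omega
        rw [h]
        show (1:Int) ≤ d.getD _ 0 + 1
        omega
      · exact hd kv h.1

lemma counts_nodup (page : List (List (String × List String))) :
    (page.foldl bStep PySem.Dict.empty).keys.Nodup :=
  PySem.Dict.nodup_keys_foldl_insert_key page
    (fun divDict => ((PySem.Dict.mk divDict).getD "class" []).find? (fun c => PySem.Str.startswith c "x"))
    (fun d divDict => d.getD (((PySem.Dict.mk divDict).getD "class" []).find? (fun c => PySem.Str.startswith c "x")) 0 + 1)
    PySem.Dict.empty PySem.Dict.nodup_keys_empty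

theorem ports_agree (page : List (List (String × List String))) :
    getSecondMostX page = getSecondMostX_alt page := by
  have hfun : (fun (d : PySem.Dict (Option String) Int) (divDict : List (String × List String)) =>
      let fs := getClassName ((PySem.Dict.mk divDict).getD "class" []) "x"
      if (PySem.Dict.contains d fs) = false then d.insert fs 1
      else d.insert fs (d.getD fs 0 + 1)) = bStep := by
    funext d divDict
    show _ = bStep d divDict
    unfold bStep
    rw [getClassName_eq_find?]
    cases hc : PySem.Dict.contains d (((PySem.Dict.mk divDict).getD "class" []).find?
        (fun c => PySem.Str.startswith c "x")) with
    | false =>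
        rw [if_pos hc]
        show d.insert _ 1 = d.insert _ (d.getD _ 0 + 1)
        rw [PySem.Dict.getD_of_not_contains d 0 hc]
        norm_num
    | true =>
        rw [if_neg (by rw [hc]; simp)]
  unfold getSecondMostX getSecondMostX_alt
  rw [hfun]
  have hB : (fun (d : PySem.Dict (Option String) Int) (divDict : List (String × List String)) =>
      let name := firstXName ((PySem.Dict.mk divDict).getD "class" [])
      d.insert name (d.getD name 0 + 1)) = bStep := rfl
  rw [hB]
  set l := page.foldl bStep PySem.Dict.empty with hl
  show (match PySem.List.max? l.keys (fun k => l.getD k 0) with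
    | none => ""
    | some maxX =>
        match PySem.List.max? (l.erase maxX).keys (fun k => (l.erase maxX).getD k 0) with
        | none => ""
        | some (some s) => s
        | some none => "") =
    (match (l.items.foldl topTwoStep (none, 0, none, 0)).2.2.1 with
    | some (some s) => s
    | _ => "")
  have hnd : l.keys.Nodup := counts_nodup page
  have hpos : ∀ kv ∈ l.items, (1:Int) ≤ kv.2 := by
    refine counts_pos page PySem.Dict.empty ?_
    intro kv hkv
    simp [PySem.Dict.empty] at hkv
  have hnd' : (l.items.map Prod.fst).Nodup := hnd
  rw [max?_keys_getD l hnd, bfold_spec l.items hnd' hpos]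
  cases hm : PySem.List.max? l.items Prod.snd with
  | none =>
      have hsec : secSpec l.items = none := by unfold secSpec; rw [hm]
      simp [hsec]
  | some b =>
      have hc2nd : (l.erase b.1).keys.Nodup := by
        have hsub : (l.erase b.1).keys.Sublist l.keys := by
          show ((l.items.filter _).map Prod.fst).Sublist (l.items.map Prod.fst)
          exact List.Sublist.map Prod.fst List.filter_sublist
        exact hnd.sublist hsub
      have hsec : secSpec l.items = PySem.List.max? (l.items.filter (fun p => !(p.1 == b.1))) Prod.snd := by
        unfold secSpec; rw [hm]
      simp only [Option.map_some]
      show (match PySem.List.max? (l.erase b.1).keys (fun k => (l.erase b.1).getD k 0) with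
        | none => ""
        | some (some s) => s
        | some none => "") =
        (match (secSpec l.items).map Prod.fst with
        | some (some s) => s
        | _ => "")
      rw [max?_keys_getD _ hc2nd]
      have hitems : (l.erase b.1).items = l.items.filter (fun p => !(p.1 == b.1)) := rfl
      rw [hitems, ← hsec]
      cases hs : secSpec l.items with
      | none => rfl
      | some s =>
          obtain ⟨k, v⟩ := s
          cases k <;> rfl

-- ===== VERDICT (by name: the statement is the Claim_ definition above) =====
theorem getSecondMostX_spec : Claim_equal_getSecondMostX := by
  intro page _ _
  exact ports_agree page
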